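-- pv_equiv track=rewrite | github.com/TomBergmanis/python_progress | test.py | get_weekly_totals
-- ===== SOURCE A (Python) =====
-- def get_weekly_totals(hours_per_day):
--     weekly_totals = []
--     total_hours = 0
--
--     for hours in hours_per_day:
--         total_hours += hours
--         if len(weekly_totals) % 7 == 6:  # end of the week
--             weekly_totals.append(total_hours)
--             total_hours = 0
--         else:
--             weekly_totals.append(None)
--
--     return weekly_totals
-- ===== SOURCE B (Python) =====
-- def get_weekly_totals(hours_per_day):
--     result = []
--     for i in range(0, len(hours_per_day), 7):
--         group = hours_per_day[i:i+7]
--         if len(group) == 7: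
--             result.extend([None] * 6)
--             result.append(sum(group))
--         else:
--             result.extend([None] * len(group))
--     return result
-- ===== Notes on version B (the rewrite author's own statement) =====
-- stated objective: alternative
-- what changed: Replaced A's per-element loop with a running accumulator and len%7 test by a chunks-of-7 traversal that emits six Nones plus the chunk sum per full week and only Nones for a trailing partial week.
import Mathlib
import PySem

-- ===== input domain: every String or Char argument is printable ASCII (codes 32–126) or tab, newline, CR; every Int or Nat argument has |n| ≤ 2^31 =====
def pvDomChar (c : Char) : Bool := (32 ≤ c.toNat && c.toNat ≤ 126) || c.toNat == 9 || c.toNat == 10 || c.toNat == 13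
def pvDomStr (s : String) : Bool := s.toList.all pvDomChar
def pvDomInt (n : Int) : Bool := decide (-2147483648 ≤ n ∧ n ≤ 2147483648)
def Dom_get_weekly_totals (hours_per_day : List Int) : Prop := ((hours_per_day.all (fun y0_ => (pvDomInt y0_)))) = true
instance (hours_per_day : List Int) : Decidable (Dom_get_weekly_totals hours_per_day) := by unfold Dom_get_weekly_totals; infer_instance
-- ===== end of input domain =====

-- B replaces A's running accumulator + len%7 test by a chunks-of-7 traversal (alternative decomposition, same cost).

-- ===== PORT A =====
-- step of A's loop: state = (weekly_totals, total_hours)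
def pvAStep (s : List (Option Int) × Int) (hours : Int) : List (Option Int) × Int :=
  let total := s.2 + hours
  if s.1.length % 7 = 6 then (s.1 ++ [some total], 0) else (s.1 ++ [none], total)

def get_weekly_totals (hours_per_day : List Int) : List (Option Int) :=
  (hours_per_day.foldl pvAStep ([], 0)).1

-- ===== PORT B =====
-- B walks the input in chunks of 7 days
def pvBChunks : List Int → List (Option Int)
  | a :: b :: c :: d :: e :: f :: g :: rest =>
      [none, none, none, none, none, none, some (a + b + c + d + e + f + g)] ++ pvBChunks rest
  | rest => rest.map (fun _ => none)

def get_weekly_totals_alt (hours_per_day : List Int) : List (Option Int) :=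
  pvBChunks hours_per_day

-- ===== PRECONDITION & SPEC =====
def Spec_get_weekly_totals (hours_per_day : List Int) (out : List (Option Int)) : Prop := out = get_weekly_totals_alt hours_per_day
instance (hours_per_day : List Int) (out : List (Option Int)) : Decidable (Spec_get_weekly_totals hours_per_day out) := by unfold Spec_get_weekly_totals; infer_instance

-- ===== CLAIM (what is proved, stated in full; the proofs are below) =====
def Claim_equal_get_weekly_totals : Prop := ∀ (hours_per_day : List Int), Dom_get_weekly_totals hours_per_day → Spec_get_weekly_totals hours_per_day (get_weekly_totals hours_per_day)

-- ===== LEMMAS AND PROOFS =====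

-- Loop invariant: at a week boundary (acc length ≡ 0 mod 7, total reset to 0),
-- A's remaining loop appends exactly B's chunked output.
theorem pvLoopEq : ∀ (xs : List Int) (acc : List (Option Int)), acc.length % 7 = 0 →
    (xs.foldl pvAStep (acc, 0)).1 = acc ++ pvBChunks xs
  | a :: b :: c :: d :: e :: f :: g :: rest, acc, h => by
      have h0 : ¬ acc.length % 7 = 6 := by omega
      have h1 : ¬ (acc.length + 1) % 7 = 6 := by omega
      have h2 : ¬ (acc.length + 2) % 7 = 6 := by omega
      have h3 : ¬ (acc.length + 3) % 7 = 6 := by omega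
      have h4 : ¬ (acc.length + 4) % 7 = 6 := by omega
      have h5 : ¬ (acc.length + 5) % 7 = 6 := by omega
      have h6 : (acc.length + 6) % 7 = 6 := by omega
      have hrec := pvLoopEq rest
        (acc ++ [none, none, none, none, none, none, some (0 + a + b + c + d + e + f + g)])
        (by simp; omega)
      simp only [List.foldl, pvAStep, List.length_append, List.length_cons, List.length_nil,
        h0, h1, h2, h3, h4, h5, h6, if_false, if_pos,
        List.append_assoc, List.cons_append, List.nil_append] at hrec ⊢
      rw [hrec]
      simp [pvBChunks]
  | [], acc, h => by simp [pvBChunks]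
  | [a], acc, h => by
      have h0 : ¬ acc.length % 7 = 6 := by omega
      simp [pvBChunks, pvAStep, h0]
  | [a, b], acc, h => by
      have h0 : ¬ acc.length % 7 = 6 := by omega
      have h1 : ¬ (acc.length + 1) % 7 = 6 := by omega
      simp [pvBChunks, pvAStep, h0, h1]
  | [a, b, c], acc, h => by
      have h0 : ¬ acc.length % 7 = 6 := by omega
      have h1 : ¬ (acc.length + 1) % 7 = 6 := by omega
      have h2 : ¬ (acc.length + 2) % 7 = 6 := by omega
      simp [pvBChunks, pvAStep, h0, h1, h2]
  | [a, b, c, d], acc, h => by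
      have h0 : ¬ acc.length % 7 = 6 := by omega
      have h1 : ¬ (acc.length + 1) % 7 = 6 := by omega
      have h2 : ¬ (acc.length + 2) % 7 = 6 := by omega
      have h3 : ¬ (acc.length + 3) % 7 = 6 := by omega
      simp [pvBChunks, pvAStep, h0, h1, h2, h3]
  | [a, b, c, d, e], acc, h => by
      have h0 : ¬ acc.length % 7 = 6 := by omega
      have h1 : ¬ (acc.length + 1) % 7 = 6 := by omega
      have h2 : ¬ (acc.length + 2) % 7 = 6 := by omega
      have h3 : ¬ (acc.length + 3) % 7 = 6 := by omega
      have h4 : ¬ (acc.length + 4) % 7 = 6 := by omega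
      simp [pvBChunks, pvAStep, h0, h1, h2, h3, h4]
  | [a, b, c, d, e, f], acc, h => by
      have h0 : ¬ acc.length % 7 = 6 := by omega
      have h1 : ¬ (acc.length + 1) % 7 = 6 := by omega
      have h2 : ¬ (acc.length + 2) % 7 = 6 := by omega
      have h3 : ¬ (acc.length + 3) % 7 = 6 := by omega
      have h4 : ¬ (acc.length + 4) % 7 = 6 := by omega
      have h5 : ¬ (acc.length + 5) % 7 = 6 := by omega
      simp [pvBChunks, pvAStep, h0, h1, h2, h3, h4, h5]

-- ===== VERDICT (by name: the statement is the Claim_ definition above) =====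
theorem get_weekly_totals_spec : Claim_equal_get_weekly_totals := by
  intro xs _
  unfold Spec_get_weekly_totals get_weekly_totals get_weekly_totals_alt
  simpa using pvLoopEq xs [] (by simp)
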